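-- pv_equiv track=rewrite | github.com/Shunsuke-1994/rfamgen | src/preprocess.py | fold_by_SS_cons
-- ===== SOURCE A (Python) =====
-- from collections import deque
--
-- def fold_by_SS_cons(alnseq, normalized_SS_cons):
--     alnseq = alnseq.upper()
--     deque_5bra = deque()
--     seq = []
--     ss   = []
--     for n, (alnseq_n, alnss_n) in enumerate(zip(alnseq, normalized_SS_cons)):
--
--         if alnss_n == "(":
--             deque_5bra.append([n, alnseq_n])
--             seq_n, ss_n = alnseq_n, "("
--
--         elif alnss_n == ")":
--             counter_n, counter_alnseq_n = deque_5bra.pop()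
--             # both nuc is not deleted.
--             if not "-" in [alnseq_n, counter_alnseq_n]:
--                 # paired
--                 if {alnseq_n, counter_alnseq_n} in [{"A", "U"}, {"U", "G"}, {"G","C"}]:
--                     seq_n, ss_n = alnseq_n, ")"
--                 # unpaired
--                 else:
--                     seq_n, ss_n = alnseq_n, "."
--                     ss[counter_n] = "."
--
--             # this nuc is  deleted
--             elif alnseq_n == "-" and counter_alnseq_n != "-":
--                 seq_n, ss_n = "-", " "
--                 ss[counter_n] = "."
--
--             # the counter nuc is deleted
--             elif alnseq_n != "-" and counter_alnseq_n == "-":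
--                 seq_n, ss_n = alnseq_n, "."
--                 ss[counter_n] = " "
--
--             # both is deleted
--             else:
--                 seq_n, ss_n = "-", " "
--                 ss[counter_n] = " "
--
--         # not deleted and single strand
--         elif alnseq_n != "-" and alnss_n == "." :
--             seq_n, ss_n = alnseq_n, "."
--
--         # deletion and single strand
--         else:
--             seq_n, ss_n = "-", " "
--
--         seq+= seq_n
--         ss  += ss_n
--     return "".join(seq).replace("-", ""), "".join(ss).replace(" ", "")
-- ===== SOURCE B (Python) =====
-- def fold_by_SS_cons(alnseq, normalized_SS_cons):
--     s = alnseq.upper()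
--     t = normalized_SS_cons
--     m = min(len(s), len(t))
--     # pass 1: match brackets; an unbalanced ')' pops an empty stack -> IndexError, as in the original
--     stack = []
--     partner = {}
--     for i in range(m):
--         c = t[i]
--         if c == "(":
--             stack.append(i)
--         elif c == ")":
--             j = stack.pop()
--             partner[j] = i
--             partner[i] = j
--     pair_ok = lambda a, b: {a, b} in [{"A", "U"}, {"U", "G"}, {"G", "C"}]
--     # pass 2: classify every position independently from its partner's character
--     def classify(i):
--         a = s[i]
--         c = t[i]
--         if c == "(":
--             if i not in partner:
--                 return a, "("            # unmatched open bracket keeps its '('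
--             b = s[partner[i]]
--             if a == "-":
--                 return a, " "
--             if b == "-":
--                 return a, "."
--             return a, ("(" if pair_ok(a, b) else ".")
--         if c == ")":
--             b = s[partner[i]]
--             if a == "-":
--                 return "-", " "
--             if b == "-":
--                 return a, "."
--             return a, (")" if pair_ok(a, b) else ".")
--         if a != "-" and c == ".":
--             return a, "."
--         return "-", " "
--     pairs = [classify(i) for i in range(m)]
--     seq = "".join(p[0] for p in pairs).replace("-", "")
--     ss = "".join(p[1] for p in pairs).replace(" ", "")
--     return seq, ss
-- ===== Notes on version B (the rewrite author's own statement) =====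
-- stated objective: alternative
-- what changed: Replaces A's single pass with a mutable stack that patches earlier ss entries in place by two passes: pass 1 builds a bracket-matching dict with a stack, pass 2 classifies every position independently from its partner's character, so no output entry is ever rewritten.
import Mathlib
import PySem

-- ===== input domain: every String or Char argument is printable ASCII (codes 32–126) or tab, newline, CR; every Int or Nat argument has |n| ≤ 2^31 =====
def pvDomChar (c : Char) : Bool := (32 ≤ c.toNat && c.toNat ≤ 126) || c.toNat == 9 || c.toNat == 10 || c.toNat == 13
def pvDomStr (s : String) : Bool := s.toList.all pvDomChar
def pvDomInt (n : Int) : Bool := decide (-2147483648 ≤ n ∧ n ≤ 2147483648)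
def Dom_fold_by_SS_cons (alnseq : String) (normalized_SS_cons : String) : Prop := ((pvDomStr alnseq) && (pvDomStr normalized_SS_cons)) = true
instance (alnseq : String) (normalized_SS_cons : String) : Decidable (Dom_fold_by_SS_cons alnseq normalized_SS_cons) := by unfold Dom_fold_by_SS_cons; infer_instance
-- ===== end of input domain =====

-- B replaces A's single pass (stack + in-place patching of earlier ss entries) by a bracket-matching
-- pass that builds a partner dict, then an independent per-position classification pass.

-- ===== PORT A =====
-- shared transliteration of the pair-set test `{alnseq_n, counter_alnseq_n} in [{"A","U"},{"U","G"},{"G","C"}]`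
-- (set equality ignores order, hence both orders of each pair):
def pvPair (a b : Char) : Bool :=
  (a == 'A' && b == 'U') || (a == 'U' && b == 'A') ||
  (a == 'U' && b == 'G') || (a == 'G' && b == 'U') ||
  (a == 'G' && b == 'C') || (a == 'C' && b == 'G')

-- one iteration of A's loop; state = (deque_5bra, seq, ss); item = (n, alnseq_n, alnss_n).
-- `deque.pop()` on an empty deque raises IndexError in Python: those inputs are outside Pre_;
-- here the state is returned unchanged.  `ss[counter_n] = …` is List.set; the stored index n
-- comes from enumerate, so it is nonnegative and `.toNat` is exact.
def pvStepA (st : List (Int × Char) × List Char × List Char) (p : Int × Char × Char) :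
    List (Int × Char) × List Char × List Char :=
  let stk := st.1; let seq := st.2.1; let ss := st.2.2
  let n := p.1; let a := p.2.1; let c := p.2.2
  if c = '(' then (stk ++ [(n, a)], seq ++ [a], ss ++ ['('])
  else if c = ')' then
    match stk.getLast? with
    | none => (stk, seq, ss)
    | some q =>
      let cn := q.1; let ca := q.2
      let stk' := stk.dropLast
      if a ≠ '-' ∧ ca ≠ '-' then
        if pvPair a ca then (stk', seq ++ [a], ss ++ [')'])
        else (stk', seq ++ [a], ss.set cn.toNat '.' ++ ['.'])
      else if a = '-' ∧ ca ≠ '-' then (stk', seq ++ ['-'], ss.set cn.toNat '.' ++ [' '])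
      else if a ≠ '-' ∧ ca = '-' then (stk', seq ++ [a], ss.set cn.toNat ' ' ++ ['.'])
      else (stk', seq ++ ['-'], ss.set cn.toNat ' ' ++ [' '])
  else if a ≠ '-' ∧ c = '.' then (stk, seq ++ [a], ss ++ ['.'])
  else (stk, seq ++ ['-'], ss ++ [' '])

def fold_by_SS_cons (alnseq : String) (normalized_SS_cons : String) : String × String :=
  let s := (PySem.Str.upper alnseq).toList
  let t := normalized_SS_cons.toList
  let st := (PySem.List.enumerate (s.zip t)).foldl pvStepA ([], [], [])
  -- `"".join(chars)` is String.ofList; `.replace` is PySem.Str.replace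
  (PySem.Str.replace (String.ofList st.2.1) "-" "", PySem.Str.replace (String.ofList st.2.2) " " "")

-- ===== PORT B =====
-- pass 1 of Source B: stack + partner dict.  Python pushes/pops at the list's end; ported as
-- cons/uncons at the head (the same stack).  `t[i]` with i < m is always in range, so getD is
-- exact; `stack.pop()` on an empty stack raises IndexError in Python (outside Pre_): state kept.
def pvStep1 (t : List Char) (st : List Nat × PySem.Dict Nat Nat) (i : Nat) :
    List Nat × PySem.Dict Nat Nat :=
  let c := t.getD i ' '
  if c = '(' then (i :: st.1, st.2)
  else if c = ')' then
    match st.1 with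
    | [] => st
    | j :: rest => (rest, (st.2.insert j i).insert i j)
  else st

-- pass 2 of Source B: classify position i from its own and its partner's character.  A ')' without
-- a partner entry is unreachable inside Pre_ (pass 1 already raised): dummy value in that branch.
def pvClassify (s t : List Char) (partner : PySem.Dict Nat Nat) (i : Nat) : Char × Char :=
  let a := s.getD i ' '
  let c := t.getD i ' '
  if c = '(' then
    match partner.get? i with
    | none => (a, '(')
    | some j =>
      let b := s.getD j ' '
      if a = '-' then (a, ' ')
      else if b = '-' then (a, '.')
      else if pvPair a b then (a, '(') else (a, '.')
  else if c = ')' then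
    match partner.get? i with
    | none => (a, '?')
    | some j =>
      let b := s.getD j ' '
      if a = '-' then ('-', ' ')
      else if b = '-' then (a, '.')
      else if pvPair a b then (a, ')') else (a, '.')
  else if a ≠ '-' ∧ c = '.' then (a, '.')
  else ('-', ' ')

def fold_by_SS_cons_alt (alnseq : String) (normalized_SS_cons : String) : String × String :=
  let s := (PySem.Str.upper alnseq).toList
  let t := normalized_SS_cons.toList
  let m := min s.length t.length
  let partner := ((List.range m).foldl (pvStep1 t) ([], PySem.Dict.empty)).2
  let pairs := (List.range m).map (pvClassify s t partner)
  (PySem.Str.replace (String.ofList (pairs.map Prod.fst)) "-" "",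
   PySem.Str.replace (String.ofList (pairs.map Prod.snd)) " " "")

-- ===== PRECONDITION & SPEC =====
-- Pre_ excludes exactly the inputs on which A raises IndexError: a ')' inside the zipped region
-- of the consensus structure with no matching '(' before it (B raises there too).
def Pre_fold_by_SS_cons (alnseq : String) (normalized_SS_cons : String) : Prop :=
  ∀ k ≤ min alnseq.toList.length normalized_SS_cons.toList.length,
    ((normalized_SS_cons.toList.take k).count ')') ≤ ((normalized_SS_cons.toList.take k).count '(')
instance (alnseq : String) (normalized_SS_cons : String) : Decidable (Pre_fold_by_SS_cons alnseq normalized_SS_cons) := by unfold Pre_fold_by_SS_cons; infer_instance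
def pvWitness_fold_by_SS_cons : String × String := ("gAu-Uc.x", "((.)).x(")

def Spec_fold_by_SS_cons (alnseq : String) (normalized_SS_cons : String) (out : String × String) : Prop := out = fold_by_SS_cons_alt alnseq normalized_SS_cons
instance (alnseq : String) (normalized_SS_cons : String) (out : String × String) : Decidable (Spec_fold_by_SS_cons alnseq normalized_SS_cons out) := by unfold Spec_fold_by_SS_cons; infer_instance

-- ===== CLAIM (what is proved, stated in full; the proofs are below) =====
def Claim_equal_fold_by_SS_cons : Prop := ∀ (alnseq : String) (normalized_SS_cons : String), Dom_fold_by_SS_cons alnseq normalized_SS_cons → Pre_fold_by_SS_cons alnseq normalized_SS_cons → Spec_fold_by_SS_cons alnseq normalized_SS_cons (fold_by_SS_cons alnseq normalized_SS_cons)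

-- ===== LEMMAS AND PROOFS =====

def pvItem (s t : List Char) (k : Nat) : Int × Char × Char := ((k : Int), s.getD k ' ', t.getD k ' ')
def pvRunA (s t : List Char) (i cnt : Nat) (st : List (Int × Char) × List Char × List Char) :
    List (Int × Char) × List Char × List Char :=
  ((List.range' i cnt).map (pvItem s t)).foldl pvStepA st
def pvRunP (t : List Char) (i cnt : Nat) (st : List Nat × PySem.Dict Nat Nat) :
    List Nat × PySem.Dict Nat Nat :=
  (List.range' i cnt).foldl (pvStep1 t) st

lemma pvRunA_succ (s t : List Char) (i cnt : Nat) (st : List (Int × Char) × List Char × List Char) :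
    pvRunA s t i (cnt + 1) st = pvRunA s t (i + 1) cnt (pvStepA st (pvItem s t i)) := by
  simp [pvRunA, List.range'_succ]
lemma pvRunP_succ (t : List Char) (i cnt : Nat) (st : List Nat × PySem.Dict Nat Nat) :
    pvRunP t i (cnt + 1) st = pvRunP t (i + 1) cnt (pvStep1 t st i) := by
  simp [pvRunP, List.range'_succ]

lemma pvPair_comm (a b : Char) : pvPair a b = pvPair b a := by
  simp only [pvPair]
  cases a == 'A' <;> cases b == 'U' <;> cases a == 'U' <;> cases b == 'A' <;>
    cases b == 'G' <;> cases a == 'G' <;> cases b == 'C' <;> cases a == 'C' <;> rfl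

-- step-evaluation lemmas for A
lemma pvStepA_open (s t : List Char) (i : Nat) (stk : List (Int × Char)) (seq ss : List Char)
    (hc : t.getD i ' ' = '(') :
    pvStepA (stk, seq, ss) (pvItem s t i)
      = (stk ++ [((i : Int), s.getD i ' ')], seq ++ [s.getD i ' '], ss ++ ['(']) := by
  simp only [pvStepA, pvItem]
  rw [if_pos hc]
lemma pvStepA_close (s t : List Char) (i : Nat) (l : List (Int × Char)) (cn : Int) (ca : Char)
    (seq ss : List Char) (hc1 : t.getD i ' ' ≠ '(') (hc2 : t.getD i ' ' = ')') :
    pvStepA (l ++ [(cn, ca)], seq, ss) (pvItem s t i)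
      = (if s.getD i ' ' ≠ '-' ∧ ca ≠ '-' then
           if pvPair (s.getD i ' ') ca then (l, seq ++ [s.getD i ' '], ss ++ [')'])
           else (l, seq ++ [s.getD i ' '], ss.set cn.toNat '.' ++ ['.'])
         else if s.getD i ' ' = '-' ∧ ca ≠ '-' then (l, seq ++ ['-'], ss.set cn.toNat '.' ++ [' '])
         else if s.getD i ' ' ≠ '-' ∧ ca = '-' then (l, seq ++ [s.getD i ' '], ss.set cn.toNat ' ' ++ ['.'])
         else (l, seq ++ ['-'], ss.set cn.toNat ' ' ++ [' '])) := by
  simp only [pvStepA, pvItem]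
  rw [if_neg hc1, if_pos hc2, List.getLast?_concat, List.dropLast_concat]
lemma pvStepA_other (s t : List Char) (i : Nat) (stk : List (Int × Char)) (seq ss : List Char)
    (hc1 : t.getD i ' ' ≠ '(') (hc2 : t.getD i ' ' ≠ ')') :
    pvStepA (stk, seq, ss) (pvItem s t i)
      = (if s.getD i ' ' ≠ '-' ∧ t.getD i ' ' = '.' then (stk, seq ++ [s.getD i ' '], ss ++ ['.'])
         else (stk, seq ++ ['-'], ss ++ [' '])) := by
  simp only [pvStepA, pvItem]
  rw [if_neg hc1, if_neg hc2]
-- step-evaluation lemmas for B's pass 1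
lemma pvStep1_open (t : List Char) (stk : List Nat) (d : PySem.Dict Nat Nat) (i : Nat)
    (hc : t.getD i ' ' = '(') : pvStep1 t (stk, d) i = (i :: stk, d) := by
  simp only [pvStep1]; rw [if_pos hc]
lemma pvStep1_close_nil (t : List Char) (d : PySem.Dict Nat Nat) (i : Nat)
    (hc1 : t.getD i ' ' ≠ '(') (hc2 : t.getD i ' ' = ')') :
    pvStep1 t ([], d) i = ([], d) := by
  simp only [pvStep1]; rw [if_neg hc1, if_pos hc2]
lemma pvStep1_close_cons (t : List Char) (d : PySem.Dict Nat Nat) (i j : Nat) (rest : List Nat)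
    (hc1 : t.getD i ' ' ≠ '(') (hc2 : t.getD i ' ' = ')') :
    pvStep1 t (j :: rest, d) i = (rest, (d.insert j i).insert i j) := by
  simp only [pvStep1]; rw [if_neg hc1, if_pos hc2]
lemma pvStep1_other (t : List Char) (stk : List Nat) (d : PySem.Dict Nat Nat) (i : Nat)
    (hc1 : t.getD i ' ' ≠ '(') (hc2 : t.getD i ' ' ≠ ')') : pvStep1 t (stk, d) i = (stk, d) := by
  simp only [pvStep1]; rw [if_neg hc1, if_neg hc2]
-- classification unfolded per case
lemma pvClassify_open_none (s t : List Char) (D : PySem.Dict Nat Nat) (i : Nat)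
    (hc : t.getD i ' ' = '(') (hg : D.get? i = none) :
    pvClassify s t D i = (s.getD i ' ', '(') := by
  simp only [pvClassify]; rw [if_pos hc, hg]
lemma pvClassify_open_some (s t : List Char) (D : PySem.Dict Nat Nat) (i p : Nat)
    (hc : t.getD i ' ' = '(') (hg : D.get? i = some p) :
    pvClassify s t D i = (s.getD i ' ',
      if s.getD i ' ' = '-' then ' ' else if s.getD p ' ' = '-' then '.'
      else if pvPair (s.getD i ' ') (s.getD p ' ') then '(' else '.') := by
  simp only [pvClassify]; rw [if_pos hc, hg]
  split_ifs <;> simp_all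
lemma pvClassify_close_some (s t : List Char) (D : PySem.Dict Nat Nat) (i p : Nat)
    (hc1 : t.getD i ' ' ≠ '(') (hc2 : t.getD i ' ' = ')') (hg : D.get? i = some p) :
    pvClassify s t D i =
      (if s.getD i ' ' = '-' then '-' else s.getD i ' ',
       if s.getD i ' ' = '-' then ' ' else if s.getD p ' ' = '-' then '.'
       else if pvPair (s.getD i ' ') (s.getD p ' ') then ')' else '.') := by
  simp only [pvClassify]; rw [if_neg hc1, if_pos hc2, hg]
  split_ifs <;> simp_all
lemma pvClassify_other (s t : List Char) (D : PySem.Dict Nat Nat) (i : Nat)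
    (hc1 : t.getD i ' ' ≠ '(') (hc2 : t.getD i ' ' ≠ ')') :
    pvClassify s t D i =
      (if s.getD i ' ' ≠ '-' ∧ t.getD i ' ' = '.' then (s.getD i ' ', '.') else ('-', ' ')) := by
  simp only [pvClassify]; rw [if_neg hc1, if_neg hc2]

lemma pvMapRangeSet (i j : Nat) (f : Nat → Char) (x : Char) :
    ((List.range i).map f).set j x = (List.range i).map (fun k => if k = j then x else f k) := by
  apply List.ext_getElem
  · simp
  · intro k h1 h2
    simp only [List.getElem_set, List.getElem_map, List.getElem_range]
    by_cases hk : j = k <;> simp [hk]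
    · omega

-- the patched prefix in A's ')' step equals B's classification prefix
lemma pvSSClose (s t : List Char) (D : PySem.Dict Nat Nat) (i j : Nat) (rest : List Nat)
    (hj : j < i) (hjr : j ∉ rest) (hir : ∀ x ∈ rest, x < i) :
    ((List.range i).map (fun k => if k ∈ j :: rest then '(' else (pvClassify s t D k).2)).set j
        ((pvClassify s t D j).2) ++ [(pvClassify s t D i).2]
      = (List.range (i + 1)).map (fun k => if k ∈ rest then '(' else (pvClassify s t D k).2) := by
  rw [pvMapRangeSet, List.range_succ, List.map_append]
  congr 1
  · apply List.map_congr_left; intro k hk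
    have hklt : k < i := List.mem_range.mp hk
    by_cases hkj : k = j
    · subst hkj; simp [hjr]
    · simp [hkj, List.mem_cons]
  · have hi : i ∉ rest := fun h => absurd (hir i h) (by omega)
    simp [hi]

lemma pvRunP_get?_stable (t : List Char) :
    ∀ cnt i stk (d : PySem.Dict Nat Nat) k, (∀ j ∈ stk, j < i) → k ∉ stk → k < i →
      ((pvRunP t i cnt (stk, d)).2).get? k = d.get? k := by
  intro cnt
  induction cnt with
  | zero => intro i stk d k _ _ _; rfl
  | succ m ih =>
    intro i stk d k hlt hk hki
    rw [pvRunP_succ]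
    by_cases hc1 : t.getD i ' ' = '('
    · rw [pvStep1_open t _ _ i hc1]
      exact ih (i+1) (i :: stk) d k
        (by intro j hj; rcases List.mem_cons.mp hj with rfl | hj
            · omega
            · exact Nat.lt_succ_of_lt (hlt _ hj))
        (by simp only [List.mem_cons]; push_neg; exact ⟨by omega, hk⟩)
        (by omega)
    · by_cases hc2 : t.getD i ' ' = ')'
      · cases stk with
        | nil =>
          rw [pvStep1_close_nil t d i hc1 hc2]
          exact ih (i+1) [] d k (by simp) (by simp) (by omega)
        | cons j rest =>
          rw [pvStep1_close_cons t d i j rest hc1 hc2]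
          have h1 : k ≠ j := by intro h; subst h; exact hk (by simp)
          have h2 : k ≠ i := by omega
          rw [ih (i+1) rest _ k
            (by intro x hx; exact Nat.lt_succ_of_lt (hlt x (by simp [hx])))
            (by intro hkr; exact hk (by simp [hkr])) (by omega)]
          rw [PySem.Dict.get?_insert_of_ne _ _ h2, PySem.Dict.get?_insert_of_ne _ _ h1]
      · rw [pvStep1_other t _ _ i hc1 hc2]
        exact ih (i+1) stk d k (fun j hj => Nat.lt_succ_of_lt (hlt j hj)) hk (by omega)

lemma pvRunP_inv (t : List Char) :
    ∀ cnt i stk (d : PySem.Dict Nat Nat),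
      (∀ j ∈ stk, j < i ∧ t.getD j ' ' = '(') → stk.Nodup →
      (∀ j ∈ stk, d.get? j = none) → (∀ k, i ≤ k → d.get? k = none) →
      (∀ j ∈ (pvRunP t i cnt (stk, d)).1, j < i + cnt ∧ t.getD j ' ' = '(') ∧
      (pvRunP t i cnt (stk, d)).1.Nodup ∧
      (∀ j ∈ (pvRunP t i cnt (stk, d)).1, ((pvRunP t i cnt (stk, d)).2).get? j = none) ∧
      (∀ k, i + cnt ≤ k → ((pvRunP t i cnt (stk, d)).2).get? k = none) := by
  intro cnt
  induction cnt with
  | zero =>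
    intro i stk d h1 h2 h3 h4
    exact ⟨fun j hj => by simpa using h1 j hj, h2, h3, fun k hk => h4 k (by omega)⟩
  | succ m ih =>
    intro i stk d h1 h2 h3 h4
    rw [pvRunP_succ]
    have harith : i + 1 + m = i + (m + 1) := by omega
    by_cases hc1 : t.getD i ' ' = '('
    · rw [pvStep1_open t _ _ i hc1]
      have := ih (i+1) (i :: stk) d
        (by intro j hj; rcases List.mem_cons.mp hj with rfl | hj
            · exact ⟨by omega, hc1⟩
            · exact ⟨by have := (h1 _ hj).1; omega, (h1 _ hj).2⟩)
        (List.nodup_cons.mpr ⟨by intro hmem; have := (h1 _ hmem).1; omega, h2⟩)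
        (by intro j hj; rcases List.mem_cons.mp hj with rfl | hj
            · exact h4 j (le_refl j)
            · exact h3 _ hj)
        (fun k hk => h4 k (by omega))
      rwa [harith] at this
    · by_cases hc2 : t.getD i ' ' = ')'
      · cases stk with
        | nil =>
          rw [pvStep1_close_nil t d i hc1 hc2]
          have := ih (i+1) [] d (by simp) (by simp) (by simp)
            (fun k hk => h4 k (by omega))
          rwa [harith] at this
        | cons j rest =>
          rw [pvStep1_close_cons t d i j rest hc1 hc2]
          have hjlt : j < i := (h1 j (by simp)).1
          have := ih (i+1) rest ((d.insert j i).insert i j)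
            (fun x hx => ⟨by have := (h1 x (by simp [hx])).1; omega, (h1 x (by simp [hx])).2⟩)
            ((List.nodup_cons.mp h2).2)
            (by intro x hx
                have hxj : x ≠ j := by intro h; subst h; exact (List.nodup_cons.mp h2).1 hx
                have hxi : x ≠ i := by have := (h1 x (by simp [hx])).1; omega
                rw [PySem.Dict.get?_insert_of_ne _ _ hxi, PySem.Dict.get?_insert_of_ne _ _ hxj]
                exact h3 x (by simp [hx]))
            (by intro k hk
                have hki : k ≠ i := by omega
                have hkj : k ≠ j := by omega
                rw [PySem.Dict.get?_insert_of_ne _ _ hki, PySem.Dict.get?_insert_of_ne _ _ hkj]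
                exact h4 k (by omega))
          rwa [harith] at this
      · rw [pvStep1_other t _ _ i hc1 hc2]
        have := ih (i+1) stk d
          (fun j hj => ⟨by have := (h1 _ hj).1; omega, (h1 _ hj).2⟩) h2 h3
          (fun k hk => h4 k (by omega))
        rwa [harith] at this

lemma pvMain (s t : List Char) (n : Nat) (hns : n ≤ s.length) (hnt : n ≤ t.length) :
    ∀ cnt i stk (d : PySem.Dict Nat Nat) seq, i + cnt = n →
      (∀ j ∈ stk, j < i ∧ t.getD j ' ' = '(') → stk.Nodup →
      (∀ j ∈ stk, d.get? j = none) → (∀ k, i ≤ k → d.get? k = none) →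
      (∀ k, k ≤ cnt → ((t.drop i).take k).count ')' ≤ ((t.drop i).take k).count '(' + stk.length) →
      pvRunA s t i cnt ((stk.map (fun (j : Nat) => ((j : Int), s.getD j ' '))).reverse, seq,
          (List.range i).map (fun j => if j ∈ stk then '(' else (pvClassify s t (pvRunP t i cnt (stk, d)).2 j).2))
        = (((pvRunP t i cnt (stk, d)).1.map (fun (j : Nat) => ((j : Int), s.getD j ' '))).reverse,
           seq ++ (List.range' i cnt).map (fun k => (pvClassify s t (pvRunP t i cnt (stk, d)).2 k).1),
           (List.range (i + cnt)).map (fun j => if j ∈ (pvRunP t i cnt (stk, d)).1 then '(' else (pvClassify s t (pvRunP t i cnt (stk, d)).2 j).2)) := by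
  intro cnt
  induction cnt with
  | zero =>
    intro i stk d seq h0 h1 h2 h3 h4 h5
    simp [pvRunA, pvRunP]
  | succ m ih =>
    intro i stk d seq h0 h1 h2 h3 h4 h5
    have hit : i < t.length := by omega
    have hdrop : t.drop i = t.getD i ' ' :: t.drop (i + 1) := by
      rw [List.getD_eq_getElem t ' ' hit]; exact List.drop_eq_getElem_cons hit
    have harith : i + (m + 1) = (i + 1) + m := by omega
    rw [pvRunA_succ, pvRunP_succ, harith]
    by_cases hc1 : t.getD i ' ' = '('
    · -- open bracket: push
      rw [hc1] at hdrop
      rw [pvStepA_open s t i _ _ _ hc1, pvStep1_open t stk d i hc1]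
      have e2 : ((List.range i).map (fun j => if j ∈ stk then '(' else (pvClassify s t (pvRunP t (i+1) m (i :: stk, d)).2 j).2)) ++ ['(']
          = (List.range (i + 1)).map (fun j => if j ∈ i :: stk then '(' else (pvClassify s t (pvRunP t (i+1) m (i :: stk, d)).2 j).2) := by
        rw [List.range_succ, List.map_append]
        congr 1
        · apply List.map_congr_left; intro k hk
          have hklt : k < i := List.mem_range.mp hk
          have hki : k ≠ i := by omega
          by_cases hks : k ∈ stk
          · simp [hks]
          · rw [if_neg hks, if_neg (by simp [List.mem_cons, hks, hki])]
        · simp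
      have e1 : (stk.map (fun (j : Nat) => ((j : Int), s.getD j ' '))).reverse ++ [((i : Int), s.getD i ' ')]
          = ((i :: stk).map (fun (j : Nat) => ((j : Int), s.getD j ' '))).reverse := by
        simp
      have IH := ih (i + 1) (i :: stk) d (seq ++ [s.getD i ' '])
        (by omega)
        (by intro j hj; rcases List.mem_cons.mp hj with rfl | hj
            · exact ⟨by omega, hc1⟩
            · exact ⟨by have := (h1 _ hj).1; omega, (h1 _ hj).2⟩)
        (List.nodup_cons.mpr ⟨by intro hmm; have := (h1 _ hmm).1; omega, h2⟩)
        (by intro j hj; rcases List.mem_cons.mp hj with rfl | hj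
            · exact h4 j (le_refl j)
            · exact h3 _ hj)
        (fun k hk => h4 k (by omega))
        (by intro k hk
            have h5' := h5 (k + 1) (by omega)
            rw [hdrop, List.take_succ_cons] at h5'
            simp [List.count_cons] at h5' ⊢
            omega)
      rw [e2, e1, IH]
      have efst : (pvClassify s t (pvRunP t (i+1) m (i :: stk, d)).2 i).1 = s.getD i ' ' := by
        rcases hg : ((pvRunP t (i+1) m (i :: stk, d)).2).get? i with _ | p
        · rw [pvClassify_open_none s t _ i hc1 hg]
        · rw [pvClassify_open_some s t _ i p hc1 hg]
      rw [List.range'_succ, List.map_cons, efst]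
      simp
    · by_cases hc2 : t.getD i ' ' = ')'
      · -- close bracket: pop
        rw [hc2] at hdrop
        have hne : stk ≠ [] := by
          intro h; subst h
          have := h5 1 (by omega)
          rw [hdrop, List.take_succ_cons, List.take_zero] at this
          simp at this
        match stk, h1, h2, h3, h5, hne with
        | j :: rest, h1, h2, h3, h5, _ =>
        have hjlt : j < i := (h1 j (by simp)).1
        have hjt : t.getD j ' ' = '(' := (h1 j (by simp)).2
        have hrlt : ∀ x ∈ rest, x < i := fun x hx => (h1 x (by simp [hx])).1
        have hjr : j ∉ rest := (List.nodup_cons.mp h2).1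
        rw [pvStep1_close_cons t d i j rest hc1 hc2]
        have estk : ((j :: rest).map (fun (j : Nat) => ((j : Int), s.getD j ' '))).reverse
            = (rest.map (fun (j : Nat) => ((j : Int), s.getD j ' '))).reverse ++ [((j : Int), s.getD j ' ')] := by
          simp
        rw [estk, pvStepA_close s t i _ _ _ _ _ hc1 hc2]
        simp only [Int.toNat_natCast]
        have hDi : ((pvRunP t (i+1) m (rest, (d.insert j i).insert i j)).2).get? i = some j := by
          rw [pvRunP_get?_stable t m (i+1) rest _ i
            (fun x hx => Nat.lt_succ_of_lt (hrlt x hx))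
            (fun hmm => absurd (hrlt i hmm) (by omega)) (by omega)]
          exact PySem.Dict.get?_insert_self _ _ _
        have hDj : ((pvRunP t (i+1) m (rest, (d.insert j i).insert i j)).2).get? j = some i := by
          rw [pvRunP_get?_stable t m (i+1) rest _ j
            (fun x hx => Nat.lt_succ_of_lt (hrlt x hx)) hjr (by omega)]
          rw [PySem.Dict.get?_insert_of_ne _ _ (by omega : j ≠ i)]
          exact PySem.Dict.get?_insert_self _ _ _
        have hcli := pvClassify_close_some s t _ i j hc1 hc2 hDi
        have hclj := pvClassify_open_some s t _ j i hjt hDj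
        have IH := ih (i + 1) rest ((d.insert j i).insert i j)
          (seq ++ [(pvClassify s t (pvRunP t (i+1) m (rest, (d.insert j i).insert i j)).2 i).1])
          (by omega)
          (fun x hx => ⟨by have := hrlt x hx; omega, (h1 x (by simp [hx])).2⟩)
          ((List.nodup_cons.mp h2).2)
          (by intro x hx
              rw [PySem.Dict.get?_insert_of_ne _ _ (by have := hrlt x hx; omega : x ≠ i),
                  PySem.Dict.get?_insert_of_ne _ _ (by intro h; subst h; exact hjr hx : x ≠ j)]
              exact h3 x (by simp [hx]))
          (by intro k hk
              rw [PySem.Dict.get?_insert_of_ne _ _ (by omega : k ≠ i),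
                  PySem.Dict.get?_insert_of_ne _ _ (by omega : k ≠ j)]
              exact h4 k (by omega))
          (by intro k hk
              have h5' := h5 (k + 1) (by omega)
              rw [hdrop, List.take_succ_cons] at h5'
              simp [List.count_cons] at h5' ⊢
              omega)
        have ess := pvSSClose s t (pvRunP t (i+1) m (rest, (d.insert j i).insert i j)).2 i j rest hjlt hjr hrlt
        have efst2 : (pvClassify s t (pvRunP t (i+1) m (rest, (d.insert j i).insert i j)).2 i).1
            = if s.getD i ' ' = '-' then '-' else s.getD i ' ' := by rw [hcli]
        by_cases ha : s.getD i ' ' = '-'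
        · have efst3 : (pvClassify s t (pvRunP t (i+1) m (rest, (d.insert j i).insert i j)).2 i).1 = '-' := by
            rw [efst2, if_pos ha]
          have ey : (pvClassify s t (pvRunP t (i+1) m (rest, (d.insert j i).insert i j)).2 i).2 = ' ' := by
            rw [hcli]; simp only [if_pos ha]
          rw [efst3] at IH
          by_cases hca : s.getD j ' ' = '-'
          · -- both deleted
            rw [if_neg (fun h => h.1 ha), if_neg (fun h => h.2 hca), if_neg (fun h => h.1 ha)]
            have ex : (pvClassify s t (pvRunP t (i+1) m (rest, (d.insert j i).insert i j)).2 j).2 = ' ' := by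
              rw [hclj]; simp only [if_pos hca]
            rw [ex, ey] at ess
            rw [ess, List.range'_succ, List.map_cons, efst3]
            simpa using IH
          · -- this nuc deleted, counter kept
            rw [if_neg (fun h => h.1 ha), if_pos ⟨ha, hca⟩]
            have ex : (pvClassify s t (pvRunP t (i+1) m (rest, (d.insert j i).insert i j)).2 j).2 = '.' := by
              rw [hclj]; simp only [if_neg hca, if_pos ha]
            rw [ex, ey] at ess
            rw [ess, List.range'_succ, List.map_cons, efst3]
            simpa using IH
        · have efst3 : (pvClassify s t (pvRunP t (i+1) m (rest, (d.insert j i).insert i j)).2 i).1 = s.getD i ' ' := by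
            rw [efst2, if_neg ha]
          rw [efst3] at IH
          by_cases hca : s.getD j ' ' = '-'
          · -- counter deleted
            rw [if_neg (fun h => h.2 hca), if_neg (fun h => ha h.1), if_pos ⟨ha, hca⟩]
            have ex : (pvClassify s t (pvRunP t (i+1) m (rest, (d.insert j i).insert i j)).2 j).2 = ' ' := by
              rw [hclj]; simp only [if_pos hca]
            have ey : (pvClassify s t (pvRunP t (i+1) m (rest, (d.insert j i).insert i j)).2 i).2 = '.' := by
              rw [hcli]; simp only [if_neg ha, if_pos hca]
            rw [ex, ey] at ess
            rw [ess, List.range'_succ, List.map_cons, efst3]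
            simpa using IH
          · by_cases hp : pvPair (s.getD i ' ') (s.getD j ' ')
            · -- paired: ss untouched
              rw [if_pos ⟨ha, hca⟩, if_pos hp]
              have hp' : pvPair (s.getD j ' ') (s.getD i ' ') = true := by
                rw [pvPair_comm]; exact hp
              have ex : (pvClassify s t (pvRunP t (i+1) m (rest, (d.insert j i).insert i j)).2 j).2 = '(' := by
                rw [hclj]; simp only [if_neg hca, if_neg ha, if_pos hp']
              have ey : (pvClassify s t (pvRunP t (i+1) m (rest, (d.insert j i).insert i j)).2 i).2 = ')' := by
                rw [hcli]; simp only [if_neg ha, if_neg hca, if_pos hp]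
              have eset : ((List.range i).map (fun k => if k ∈ j :: rest then '(' else (pvClassify s t (pvRunP t (i+1) m (rest, (d.insert j i).insert i j)).2 k).2)).set j
                  ((pvClassify s t (pvRunP t (i+1) m (rest, (d.insert j i).insert i j)).2 j).2)
                  = (List.range i).map (fun k => if k ∈ j :: rest then '(' else (pvClassify s t (pvRunP t (i+1) m (rest, (d.insert j i).insert i j)).2 k).2) := by
                rw [ex, pvMapRangeSet]
                apply List.map_congr_left; intro k hk
                by_cases hkj : k = j
                · subst hkj; simp
                · rw [if_neg hkj]
              rw [eset, ey] at ess
              rw [ess, List.range'_succ, List.map_cons, efst3]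
              simpa using IH
            · -- unpaired
              rw [if_pos ⟨ha, hca⟩, if_neg hp]
              have hp' : ¬ pvPair (s.getD j ' ') (s.getD i ' ') = true := by
                rw [pvPair_comm]; exact hp
              have ex : (pvClassify s t (pvRunP t (i+1) m (rest, (d.insert j i).insert i j)).2 j).2 = '.' := by
                rw [hclj]; simp only [if_neg hca, if_neg ha, if_neg hp']
              have ey : (pvClassify s t (pvRunP t (i+1) m (rest, (d.insert j i).insert i j)).2 i).2 = '.' := by
                rw [hcli]; simp only [if_neg ha, if_neg hca, if_neg hp]
              rw [ex, ey] at ess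
              rw [ess, List.range'_succ, List.map_cons, efst3]
              simpa using IH
      · -- not a bracket: stack and dict unchanged
        rw [pvStep1_other t stk d i hc1 hc2, pvStepA_other s t i _ _ _ hc1 hc2]
        have hcl := pvClassify_other s t (pvRunP t (i+1) m (stk, d)).2 i hc1 hc2
        have histk : i ∉ stk := fun h => absurd (h1 i h).1 (by omega)
        have e2 : ∀ z : Char,
            ((List.range i).map (fun j => if j ∈ stk then '(' else (pvClassify s t (pvRunP t (i+1) m (stk, d)).2 j).2)) ++ [z]
            = (List.range (i + 1)).map (fun j => if j ∈ stk then '(' else (pvClassify s t (pvRunP t (i+1) m (stk, d)).2 j).2)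
            ↔ z = (if i ∈ stk then '(' else (pvClassify s t (pvRunP t (i+1) m (stk, d)).2 i).2) := by
          intro z
          rw [List.range_succ, List.map_append]
          constructor
          · intro h
            have := List.append_inj_right h (by simp)
            simpa using this
          · intro h; rw [h]; simp
        have IH := ih (i + 1) stk d
          (seq ++ [(pvClassify s t (pvRunP t (i+1) m (stk, d)).2 i).1])
          (by omega)
          (fun x hx => ⟨by have := (h1 x hx).1; omega, (h1 x hx).2⟩) h2 h3
          (fun k hk => h4 k (by omega))
          (by intro k hk
              have h5' := h5 (k + 1) (by omega)
              rw [hdrop, List.take_succ_cons] at h5'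
              have hc1' := hc1; have hc2' := hc2
              rw [List.getD_eq_getElem?_getD] at hc1' hc2'
              simp [List.count_cons, hc1', hc2'] at h5' ⊢
              omega)
        by_cases hcc : s.getD i ' ' ≠ '-' ∧ t.getD i ' ' = '.'
        · rw [if_pos hcc]
          have efst : (pvClassify s t (pvRunP t (i+1) m (stk, d)).2 i).1 = s.getD i ' ' := by
            rw [hcl, if_pos hcc]
          have esnd : (pvClassify s t (pvRunP t (i+1) m (stk, d)).2 i).2 = '.' := by
            rw [hcl, if_pos hcc]
          rw [(e2 '.').mpr (by rw [if_neg histk, esnd])]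
          rw [efst] at IH
          rw [List.range'_succ, List.map_cons, efst]
          simpa using IH
        · rw [if_neg hcc]
          have efst : (pvClassify s t (pvRunP t (i+1) m (stk, d)).2 i).1 = '-' := by
            rw [hcl, if_neg hcc]
          have esnd : (pvClassify s t (pvRunP t (i+1) m (stk, d)).2 i).2 = ' ' := by
            rw [hcl, if_neg hcc]
          rw [(e2 ' ').mpr (by rw [if_neg histk, esnd])]
          rw [efst] at IH
          rw [List.range'_succ, List.map_cons, efst]
          simpa using IH


lemma pvItems_eq (s t : List Char) :
    PySem.List.enumerate (s.zip t) = (List.range' 0 (min s.length t.length)).map (pvItem s t) := by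
  apply List.ext_getElem
  · simp [PySem.List.length_enumerate]
  · intro k h1 h2
    simp only [PySem.List.length_enumerate, List.length_zip] at h1
    simp [pvItem, PySem.List.getElem_enumerate, List.getElem_zip, List.getElem_map, List.getElem_range',
      List.getD_eq_getElem?_getD, List.getElem?_eq_getElem (by omega : k < s.length),
      List.getElem?_eq_getElem (by omega : k < t.length)]

-- ===== VERDICT (by name: the statement is the Claim_ definition above) =====
set_option maxHeartbeats 2000000 in
theorem fold_by_SS_cons_spec : Claim_equal_fold_by_SS_cons := by
  intro alnseq SS _hdom hpre
  simp only [Spec_fold_by_SS_cons, fold_by_SS_cons, fold_by_SS_cons_alt]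
  have hlen : (PySem.Str.upper alnseq).toList.length = alnseq.toList.length := by
    simp [PySem.Str.toList_upper, PySem.Chars.upper]
  set s := (PySem.Str.upper alnseq).toList with hs
  set t := SS.toList with ht
  have hmineq : min s.length t.length = min alnseq.toList.length SS.toList.length := by
    rw [hs, ht, hlen]
  have hbal : ∀ k, k ≤ min s.length t.length →
      ((t.drop 0).take k).count ')' ≤ ((t.drop 0).take k).count '(' + ([] : List Nat).length := by
    intro k hk
    rw [List.drop_zero]
    simpa using hpre k (hmineq ▸ hk)
  have hmain := pvMain s t (min s.length t.length) (Nat.min_le_left _ _) (Nat.min_le_right _ _)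
    (min s.length t.length) 0 [] PySem.Dict.empty [] (by omega)
    (by simp) (by simp) (by simp) (fun k _ => PySem.Dict.get?_empty _) hbal
  have hinv := pvRunP_inv t (min s.length t.length) 0 [] PySem.Dict.empty
    (by simp) (by simp) (by simp) (fun k _ => PySem.Dict.get?_empty _)
  have hA : (PySem.List.enumerate (s.zip t)).foldl pvStepA ([], [], [])
      = pvRunA s t 0 (min s.length t.length) ([], [], []) := by
    rw [pvRunA, pvItems_eq]
  have hB : (List.range (min s.length t.length)).foldl (pvStep1 t) ([], PySem.Dict.empty)
      = pvRunP t 0 (min s.length t.length) ([], PySem.Dict.empty) := by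
    rw [pvRunP, List.range_eq_range']
  simp only [List.map_nil, List.reverse_nil, List.range_zero] at hmain
  rw [hA, hmain, hB]
  have hseq : ([] : List Char) ++ (List.range' 0 (min s.length t.length)).map
        (fun k => (pvClassify s t (pvRunP t 0 (min s.length t.length) ([], PySem.Dict.empty)).2 k).1)
      = ((List.range (min s.length t.length)).map
          (pvClassify s t (pvRunP t 0 (min s.length t.length) ([], PySem.Dict.empty)).2)).map Prod.fst := by
    rw [List.nil_append, List.map_map, List.range_eq_range']
    rfl
  have hss : (List.range (0 + min s.length t.length)).map
        (fun j => if j ∈ (pvRunP t 0 (min s.length t.length) ([], PySem.Dict.empty)).1 then '('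
                  else (pvClassify s t (pvRunP t 0 (min s.length t.length) ([], PySem.Dict.empty)).2 j).2)
      = ((List.range (min s.length t.length)).map
          (pvClassify s t (pvRunP t 0 (min s.length t.length) ([], PySem.Dict.empty)).2)).map Prod.snd := by
    rw [List.map_map, Nat.zero_add]
    apply List.map_congr_left
    intro j hj
    by_cases hjf : j ∈ (pvRunP t 0 (min s.length t.length) ([], PySem.Dict.empty)).1
    · rw [if_pos hjf]
      have hop := (hinv.1 j hjf).2
      have hnone := hinv.2.2.1 j hjf
      simp [Function.comp, pvClassify_open_none s t _ j hop hnone]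
    · rw [if_neg hjf]; rfl
  exact congrArg₂ Prod.mk
    (congrArg (fun l => PySem.Str.replace (String.ofList l) "-" "") hseq)
    (congrArg (fun l => PySem.Str.replace (String.ofList l) " " "") hss)
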